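-- pv_equiv track=rewrite | github.com/soupcipher/elevator | python/elevator.py | elevator
-- ===== SOURCE A (Python) =====
-- def elevator(floors_to_visit):
--     SINGLE_FLOOR_TRAVEL_TIME = 10
--     total_floors_traveled = 0
--     floors_visited = ""
--
--     for i in range(len(floors_to_visit)):
--         # If there is another floor to travel to
--         if i != len(floors_to_visit) - 1:
--             # Find the absolute difference with next value
--             total_floors_traveled += abs(floors_to_visit[i] - floors_to_visit[i+1])
--
--         if floors_visited:
--             # Verify there was a floor change before adding to floors visited
--             if floors_to_visit[i] != floors_to_visit[i-1]:
--                 floors_visited += ", {0}".format(floors_to_visit[i])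
--
--         # First floor
--         else:
--             # Add floor to floors_visited string
--             floors_visited += str(floors_to_visit[i])
--
--     travel_time = SINGLE_FLOOR_TRAVEL_TIME * total_floors_traveled
--     return "{0} {1}".format(travel_time, floors_visited)
-- ===== SOURCE B (Python) =====
-- def elevator(floors_to_visit):
--     # Stage 1: collapse consecutive duplicate floors into a list of "runs".
--     runs = []
--     for f in floors_to_visit:
--         if not runs or runs[-1] != f:
--             runs.append(f)
--     # Stage 2: travel time over the deduplicated runs list (equal floors
--     # contribute |x - x| = 0, so dropping them does not change the sum).
--     time = 0
--     for a, b in zip(runs, runs[1:]):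
--         time += abs(a - b)
--     return "{0} {1}".format(10 * time, ", ".join(str(f) for f in runs))
-- ===== Notes on version B (the rewrite author's own statement) =====
-- stated objective: alternative
-- what changed: B first collapses consecutive duplicate floors into a runs list (a data structure A never builds), then derives both outputs from that smaller list: the travel time is summed over the runs (correct because equal neighbours contribute |x-x|=0) and the visited string is a plain ', '.join of the runs, whereas A does one index loop over the raw list with interleaved i-1/i+1 comparisons and quadratic-prone string concatenation.
import Mathlib
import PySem

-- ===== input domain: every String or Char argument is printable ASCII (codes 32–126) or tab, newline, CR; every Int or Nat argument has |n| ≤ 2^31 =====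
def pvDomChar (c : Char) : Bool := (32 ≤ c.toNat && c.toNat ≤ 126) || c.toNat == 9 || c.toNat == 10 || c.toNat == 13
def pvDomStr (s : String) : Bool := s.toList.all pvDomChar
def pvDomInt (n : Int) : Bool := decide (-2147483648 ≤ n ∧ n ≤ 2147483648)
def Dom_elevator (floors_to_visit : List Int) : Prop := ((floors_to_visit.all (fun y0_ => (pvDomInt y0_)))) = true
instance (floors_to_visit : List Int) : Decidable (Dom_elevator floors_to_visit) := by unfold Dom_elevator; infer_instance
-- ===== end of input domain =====

-- B first collapses consecutive duplicate floors into a runs list and derives both the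
-- travel time and the visited string from it (A loops over the raw list with index
-- comparisons); objective: alternative algorithm, same cost.

-- ===== PORT A =====
-- A's for-loop over range(len(floors_to_visit)); state = (total_floors_traveled, floors_visited).
def elevLoop (xs : List Int) (i : Nat) (tot : Int) (vis : String) : Int × String :=
  if _h : i < xs.length then
    let tot' := if (i : Int) ≠ (xs.length : Int) - 1
      then tot + |PySem.List.pyGetD xs (i : Int) 0 - PySem.List.pyGetD xs ((i : Int) + 1) 0|
      else tot
    let vis' := if vis ≠ "" then
        (if PySem.List.pyGetD xs (i : Int) 0 ≠ PySem.List.pyGetD xs ((i : Int) - 1) 0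
          then vis ++ ", " ++ PySem.Int.toStr (PySem.List.pyGetD xs (i : Int) 0)
          else vis)
      else vis ++ PySem.Int.toStr (PySem.List.pyGetD xs (i : Int) 0)
    elevLoop xs (i + 1) tot' vis'
  else (tot, vis)
  termination_by xs.length - i

def elevator (floors_to_visit : List Int) : String :=
  let r := elevLoop floors_to_visit 0 0 ""
  PySem.Int.toStr (10 * r.1) ++ " " ++ r.2

-- ===== PORT B =====
-- Stage 1: runs = dedup of consecutive duplicates (foldl mirrors Source B's append loop);
-- stage 2: time summed over runs; stage 3: join the runs.
-- Source B's dedup-loop step (the body of Source B's first for-loop)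
def runStep (runs : List Int) (f : Int) : List Int :=
  if runs = [] ∨ PySem.List.pyGetD runs (-1) 0 ≠ f then runs ++ [f] else runs

def elevator_alt (floors_to_visit : List Int) : String :=
  let runs := floors_to_visit.foldl runStep []
  let time := (runs.zip (PySem.List.slice runs (some 1) none)).foldl
    (fun t p => t + |p.1 - p.2|) (0 : Int)
  PySem.Int.toStr (10 * time) ++ " " ++ PySem.Str.join ", " (runs.map PySem.Int.toStr)

-- ===== PRECONDITION & SPEC =====
def Spec_elevator (floors_to_visit : List Int) (out : String) : Prop := out = elevator_alt floors_to_visit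
instance (floors_to_visit : List Int) (out : String) : Decidable (Spec_elevator floors_to_visit out) := by unfold Spec_elevator; infer_instance

-- ===== CLAIM (what is proved, stated in full; the proofs are below) =====
def Claim_equal_elevator : Prop := ∀ (floors_to_visit : List Int), Dom_elevator floors_to_visit → Spec_elevator floors_to_visit (elevator floors_to_visit)

-- ===== LEMMAS AND PROOFS =====

-- canonical forms both ports are reduced to
def sumDiff : List Int → Int
  | a :: b :: t => |a - b| + sumDiff (b :: t)
  | _ => 0

def visTail (prev : Int) : List Int → String
  | [] => ""
  | f :: t => (if f ≠ prev then ", " ++ PySem.Int.toStr f else "") ++ visTail f t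

def visHead : List Int → String
  | [] => ""
  | a :: t => PySem.Int.toStr a ++ visTail a t

def commaCat : List String → String
  | [] => ""
  | s :: r => ", " ++ s ++ commaCat r

-- canonical run-collapse (what Source B's first loop computes)
def runsTail (prev : Int) : List Int → List Int
  | [] => []
  | f :: t => if f = prev then runsTail f t else f :: runsTail f t

def runsR : List Int → List Int
  | [] => []
  | a :: t => a :: runsTail a t

lemma toDigitsCore_ne_nil : ∀ (b fuel n : ℕ) (ds : List Char), ds ≠ [] → Nat.toDigitsCore b fuel n ds ≠ [] := by
  intro b fuel
  induction fuel with
  | zero => intro n ds h; simpa [Nat.toDigitsCore] using h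
  | succ f ih =>
    intro n ds h
    rw [Nat.toDigitsCore]
    split
    · simp
    · exact ih _ _ (by simp)

lemma toStr_ne_empty (n : Int) : PySem.Int.toStr n ≠ "" := by
  unfold PySem.Int.toStr PySem.Int.toChars
  intro h
  have h2 := congrArg String.toList h
  simp [String.toList_ofList] at h2
  split at h2
  · simp at h2
  · revert h2
    unfold Nat.toDigits
    rw [Nat.toDigitsCore]
    split
    · simp
    · exact toDigitsCore_ne_nil _ _ _ _ (by simp)

lemma str_append_ne_empty (a b : String) (h : a ≠ "") : a ++ b ≠ "" := by
  intro he
  have h2 : a = "" ∧ b = "" := by simpa using congrArg String.toList he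
  exact h h2.1

lemma elevLoop_eq (xs : List Int) :
    ∀ (k i : Nat) (tot : Int) (vis : String), xs.length - i = k → 0 < i → i ≤ xs.length → vis ≠ "" →
    elevLoop xs i tot vis
      = (tot + sumDiff (xs.drop i), vis ++ visTail (xs.getD (i - 1) 0) (xs.drop i)) := by
  intro k
  induction k with
  | zero =>
    intro i tot vis hk h0 hi hv
    have hin : ¬ i < xs.length := by omega
    have hd : xs.drop i = [] := List.drop_eq_nil_of_le (by omega)
    rw [elevLoop]
    simp [hin, hd, sumDiff, visTail]
  | succ k ih =>
    intro i tot vis hk h0 hi hv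
    have hlt : i < xs.length := by omega
    rw [elevLoop]
    simp only [dif_pos hlt]
    have e1 : PySem.List.pyGetD xs (i : Int) 0 = xs.getD i 0 := PySem.List.pyGetD_natCast ..
    have e2 : PySem.List.pyGetD xs ((i : Int) + 1) 0 = xs.getD (i + 1) 0 := by
      have h' : ((i : Int) + 1) = (((i + 1 : Nat)) : Int) := by push_cast; ring
      rw [h', PySem.List.pyGetD_natCast]
    have e3 : PySem.List.pyGetD xs ((i : Int) - 1) 0 = xs.getD (i - 1) 0 := by
      have h' : ((i : Int) - 1) = (((i - 1 : Nat)) : Int) := by omega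
      rw [h', PySem.List.pyGetD_natCast]
    have hrec : ∀ (t : Int) (v : String), v ≠ "" →
        elevLoop xs (i + 1) t v
          = (t + sumDiff (xs.drop (i + 1)), v ++ visTail (xs.getD i 0) (xs.drop (i + 1))) := by
      intro t v hv'
      have := ih (i + 1) t v (by omega) (by omega) (by omega) hv'
      simpa using this
    have hdi : xs.drop i = xs.getD i 0 :: xs.drop (i + 1) := by
      rw [List.getD_eq_getElem xs 0 hlt]
      exact List.drop_eq_getElem_cons hlt
    have fst_eq : (if (i : Int) ≠ (xs.length : Int) - 1
          then tot + |xs.getD i 0 - xs.getD (i + 1) 0| else tot) + sumDiff (xs.drop (i + 1))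
        = tot + sumDiff (xs.drop i) := by
      by_cases hlast : i + 1 = xs.length
      · have hd1 : xs.drop (i + 1) = [] := List.drop_eq_nil_of_le (by omega)
        rw [if_neg (by omega), hdi, hd1]
        simp [sumDiff]
      · have hlt1 : i + 1 < xs.length := by omega
        have hdi1 : xs.drop (i + 1) = xs.getD (i + 1) 0 :: xs.drop (i + 2) := by
          rw [List.getD_eq_getElem xs 0 hlt1]
          exact List.drop_eq_getElem_cons hlt1
        rw [if_pos (by omega), hdi, hdi1]
        rw [show sumDiff (xs.getD i 0 :: xs.getD (i + 1) 0 :: xs.drop (i + 2))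
            = |xs.getD i 0 - xs.getD (i + 1) 0| + sumDiff (xs.getD (i + 1) 0 :: xs.drop (i + 2))
          from rfl]
        ring
    rw [e1, e2, e3, if_pos hv]
    by_cases hne : xs.getD i 0 ≠ xs.getD (i - 1) 0
    · have hne' : ¬ xs[i]?.getD 0 = xs[i - 1]?.getD 0 := by
        simpa [List.getD_eq_getElem?_getD] using hne
      rw [if_pos hne, hrec _ _ (str_append_ne_empty _ _ (str_append_ne_empty _ _ hv))]
      refine Prod.ext fst_eq ?_
      rw [hdi]
      simp [visTail, hne', String.append_assoc]
    · have hne' : xs[i]?.getD 0 = xs[i - 1]?.getD 0 := by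
        have := not_not.mp hne
        simpa [List.getD_eq_getElem?_getD] using this
      rw [if_neg hne, hrec _ _ hv]
      refine Prod.ext fst_eq ?_
      rw [hdi]
      simp [visTail, hne']

lemma elevLoop_one (a : Int) (t : List Int) (tot : Int) :
    elevLoop (a :: t) 1 tot (PySem.Int.toStr a)
      = (tot + sumDiff ((a :: t).drop 1),
         PySem.Int.toStr a ++ visTail ((a :: t).getD 0 0) ((a :: t).drop 1)) :=
  elevLoop_eq (a :: t) t.length 1 tot (PySem.Int.toStr a) (by simp) (by omega) (by simp)
    (toStr_ne_empty a)

lemma elevator_closed (xs : List Int) :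
    elevator xs = PySem.Int.toStr (10 * sumDiff xs) ++ " " ++ visHead xs := by
  cases xs with
  | nil =>
    unfold elevator
    rw [elevLoop]
    simp [sumDiff, visHead]
  | cons a t =>
    unfold elevator
    rw [elevLoop]
    simp only [dif_pos (show 0 < (a :: t).length by simp)]
    rw [if_neg (show ¬ (("" : String) ≠ "") by simp)]
    have e0 : PySem.List.pyGetD (a :: t) ((0 : Nat) : Int) 0 = (a :: t).getD 0 0 :=
      PySem.List.pyGetD_natCast ..
    have e0' : PySem.List.pyGetD (a :: t) (((0 : Nat) : Int) + 1) 0 = (a :: t).getD 1 0 := by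
      have h' : (((0 : Nat) : Int) + 1) = ((1 : Nat) : Int) := by norm_num
      rw [h', PySem.List.pyGetD_natCast]
    rw [e0, e0']
    have hemp : ("" : String) ++ PySem.Int.toStr ((a :: t).getD 0 0) = PySem.Int.toStr a := by
      simp [List.getD]
    rw [hemp]
    rw [show (0 + 1 : Nat) = 1 from rfl]
    rw [elevLoop_one]
    cases t with
    | nil => simp [sumDiff, visHead, visTail]
    | cons b t2 =>
      have hcond : ((0 : Nat) : Int) ≠ (((a :: b :: t2).length : Nat) : Int) - 1 := by
        simp; omega
      rw [if_pos hcond]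
      simp [sumDiff, visHead, visTail, List.getD]

-- ---- B side ----

lemma foldl_runStep_eq : ∀ (l : List Int) (ys : List Int) (p : Int),
    (l.foldl runStep (ys ++ [p])) = (ys ++ [p]) ++ runsTail p l
  | [], ys, p => by simp [runsTail]
  | f :: t, ys, p => by
    have hlast : PySem.List.pyGetD (ys ++ [p]) (-1) 0 = p :=
      PySem.List.pyGetD_neg_one_append_singleton ..
    by_cases hfp : f = p
    · have hcond : ¬ ((ys ++ [p]) = [] ∨ PySem.List.pyGetD (ys ++ [p]) (-1) 0 ≠ f) := by
        simp [hlast, hfp]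
      simp only [List.foldl_cons, runStep, if_neg hcond, runsTail, if_pos hfp]
      rw [foldl_runStep_eq t ys p]
      simp [hfp]
    · have hcond : ((ys ++ [p]) = [] ∨ PySem.List.pyGetD (ys ++ [p]) (-1) 0 ≠ f) := by
        simp [hlast]
        exact fun h => (hfp h.symm).elim
      simp only [List.foldl_cons, runStep, if_pos hcond, runsTail, if_neg hfp]
      rw [show (ys ++ [p]) ++ [f] = (ys ++ [p]) ++ [f] from rfl,
          foldl_runStep_eq t (ys ++ [p]) f]
      simp

lemma runs_eq (xs : List Int) : xs.foldl runStep [] = runsR xs := by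
  cases xs with
  | nil => rfl
  | cons a t =>
    have h0 : runStep [] a = [a] := by simp [runStep]
    simp only [List.foldl_cons, h0]
    have := foldl_runStep_eq t [] a
    simpa [runsR] using this

lemma foldl_absdiff_eq : ∀ (rs : List Int) (init : Int),
    ((rs.zip rs.tail).foldl (fun t p => t + |p.1 - p.2|) init) = init + sumDiff rs
  | [], init => by simp [sumDiff]
  | [_], init => by simp [sumDiff]
  | a :: b :: t, init => by
    have ih := foldl_absdiff_eq (b :: t) (init + |a - b|)
    simp only [List.tail_cons, List.zip_cons_cons, List.foldl_cons] at ih ⊢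
    rw [ih]
    show _ = init + (|a - b| + sumDiff (b :: t))
    ring

lemma sumDiff_runsTail : ∀ (t : List Int) (p : Int),
    sumDiff (p :: runsTail p t) = sumDiff (p :: t)
  | [], _ => rfl
  | f :: t', p => by
    by_cases hfp : f = p
    · have ih := sumDiff_runsTail t' f
      rw [runsTail, if_pos hfp]
      subst hfp
      calc sumDiff (f :: runsTail f t') = sumDiff (f :: t') := ih
        _ = |f - f| + sumDiff (f :: t') := by simp
        _ = sumDiff (f :: f :: t') := rfl
    · have ih := sumDiff_runsTail t' f
      rw [runsTail, if_neg hfp]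
      show |p - f| + sumDiff (f :: runsTail f t') = |p - f| + sumDiff (f :: t')
      rw [ih]

lemma commaCat_runsTail : ∀ (t : List Int) (p : Int),
    commaCat ((runsTail p t).map PySem.Int.toStr) = visTail p t
  | [], _ => rfl
  | f :: t', p => by
    by_cases hfp : f = p
    · rw [runsTail, if_pos hfp, visTail, if_neg (by simp [hfp]), commaCat_runsTail t' f]
      subst hfp; simp
    · rw [runsTail, if_neg hfp]
      simp only [List.map_cons, commaCat, commaCat_runsTail t' f]
      rw [visTail, if_pos hfp]

lemma join_comma : ∀ (L : List String) (x : String),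
    PySem.Str.join ", " (x :: L) = x ++ commaCat L
  | [], x => by
    apply String.toList_inj.mp
    simp [PySem.Str.toList_join, PySem.Chars.join_singleton, commaCat]
  | y :: r, x => by
    apply String.toList_inj.mp
    have h := congrArg String.toList (join_comma r y)
    simp [PySem.Str.toList_join, PySem.Chars.join_cons_cons, commaCat] at h ⊢
    rw [h]

lemma elevator_alt_closed (xs : List Int) :
    elevator_alt xs = PySem.Int.toStr (10 * sumDiff xs) ++ " " ++ visHead xs := by
  have hj : PySem.Str.join ", " ([] : List String) = "" :=
    String.toList_inj.mp (by simp [PySem.Str.toList_join, PySem.Chars.join_nil])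
  unfold elevator_alt
  simp only [runs_eq, PySem.List.slice_from_one, foldl_absdiff_eq]
  cases xs with
  | nil => simp [runsR, sumDiff, visHead, hj]
  | cons a t =>
    rw [show runsR (a :: t) = a :: runsTail a t from rfl]
    simp only [List.map_cons]
    rw [join_comma, commaCat_runsTail]
    rw [show (0 : Int) + sumDiff (a :: runsTail a t) = sumDiff (a :: t) by
      rw [sumDiff_runsTail]; ring]
    simp [visHead]

-- ===== VERDICT (by name: the statement is the Claim_ definition above) =====
theorem elevator_spec : Claim_equal_elevator := by
  intro xs _
  unfold Spec_elevator
  rw [elevator_closed, elevator_alt_closed]
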